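-- pv_equiv track=rewrite | github.com/Shamrock13/flintlock | src/cashel/paloalto.py | expand_service
-- ===== SOURCE A (Python) =====
-- _BROAD_VALUES = {"any", "all", "*"}
--
-- def _normalize_broad(value):
--     text = (value or "").strip()
--     if text.lower() in _BROAD_VALUES:
--         return "any"
--     return text
--
-- def _stable_unique(values):
--     seen = set()
--     output = []
--     for value in values:
--         if value not in seen:
--             seen.add(value)
--             output.append(value)
--     return sorted(output)
--
-- def expand_service(name, services, service_groups, _seen=None):
--     """Expand a Palo Alto service object or group into deterministic values."""
--     normalized = _normalize_broad(name)
--     if normalized == "any":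
--         return ["any"]
--
--     seen = set() if _seen is None else set(_seen)
--     if normalized in seen:
--         return []
--     seen.add(normalized)
--
--     if normalized in service_groups:
--         members = service_groups[normalized].get("members", [])
--         return _stable_unique(
--             value
--             for member in members
--             for value in expand_service(member, services, service_groups, seen)
--         )
--
--     if normalized in services:
--         service = services[normalized]
--         protocol = service.get("protocol", "")
--         port = service.get("port", "")
--         if protocol and port:
--             return [f"{protocol}/{port}"]
--         return [normalized]
--
--     return [normalized]
-- ===== SOURCE B (Python) =====
-- _BROAD = ("any", "all", "*")
--
--
-- def _canon(value):
--     text = value.strip() if value else ""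
--     return "any" if text.lower() in _BROAD else text
--
--
-- def _leaf(services, n):
--     if n in services:
--         service = services[n]
--         protocol = service.get("protocol", "")
--         port = service.get("port", "")
--         if protocol and port:
--             return protocol + "/" + port
--     return n
--
--
-- def expand_service(name, services, service_groups, _seen=None):
--     """Expand a Palo Alto service object or group into deterministic values.
--
--     Breadth-first expansion of the group graph, level by level, with one
--     global visited set; leaf values go into a single set, sorted once.
--     """
--     normalized = _canon(name)
--     if normalized == "any":
--         return ["any"]
--
--     visited = set(_seen or ())
--     if normalized in visited:
--         return []
--     visited.add(normalized)
--
--     if normalized not in service_groups: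
--         return [_leaf(services, normalized)]
--
--     out = set()
--     frontier = service_groups[normalized].get("members", [])
--     while frontier:
--         level = []
--         for member in frontier:
--             n = _canon(member)
--             if n == "any":
--                 out.add("any")
--             elif n not in visited:
--                 visited.add(n)
--                 if n in service_groups:
--                     level.extend(service_groups[n].get("members", []))
--                 else:
--                     out.add(_leaf(services, n))
--         frontier = level
--     return sorted(out)
-- ===== Notes on version B (the rewrite author's own statement) =====
-- stated objective: alternative
-- what changed: A recursively re-expands group members along every path (copying the seen-set per recursive call) and re-sorts/dedups at every recursion level; B expands the group graph breadth-first, level by level, with one global visited set, collecting leaf values into a single set that is sorted once.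
import Mathlib
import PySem

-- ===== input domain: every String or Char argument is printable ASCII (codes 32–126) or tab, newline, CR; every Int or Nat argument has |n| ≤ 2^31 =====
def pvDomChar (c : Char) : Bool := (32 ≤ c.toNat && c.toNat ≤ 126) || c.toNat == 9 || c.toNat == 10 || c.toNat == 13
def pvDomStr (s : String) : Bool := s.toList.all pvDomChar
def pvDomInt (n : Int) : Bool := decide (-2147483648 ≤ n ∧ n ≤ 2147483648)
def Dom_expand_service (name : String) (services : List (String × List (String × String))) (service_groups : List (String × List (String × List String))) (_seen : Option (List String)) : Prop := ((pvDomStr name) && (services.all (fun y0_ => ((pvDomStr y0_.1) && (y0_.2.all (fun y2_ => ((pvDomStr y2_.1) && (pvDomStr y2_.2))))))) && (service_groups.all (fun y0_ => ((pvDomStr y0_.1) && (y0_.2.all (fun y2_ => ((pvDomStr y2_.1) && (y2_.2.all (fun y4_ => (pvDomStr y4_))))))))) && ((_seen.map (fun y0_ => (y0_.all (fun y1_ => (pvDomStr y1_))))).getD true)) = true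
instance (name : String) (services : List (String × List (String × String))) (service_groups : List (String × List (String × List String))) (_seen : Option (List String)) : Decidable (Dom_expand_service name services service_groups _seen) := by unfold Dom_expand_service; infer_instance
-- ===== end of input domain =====

-- B replaces A's per-path recursive expansion (which re-sorts and dedups at every group level)
-- by a breadth-first, level-by-level expansion with one global visited set, collecting leaf
-- values into one set that is sorted once.

-- ===== PORT A =====

-- A's _normalize_broad
def normBroad (value : String) : String :=
  let text := PySem.Str.strip value
  if PySem.Str.lower text = "any" ∨ PySem.Str.lower text = "all" ∨ PySem.Str.lower text = "*" then "any"
  else text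

-- A's `set() if _seen is None else set(_seen)`
def seedSet (o : Option (List String)) : PySem.Set String :=
  match o with
  | none => PySem.Set.empty
  | some l => PySem.Set.ofList l

-- `service_groups[n].get("members", [])` (both Pythons; only looked up under a membership test)
def membersOf (gr : List (String × List (String × List String))) (n : String) : List String :=
  PySem.Dict.getD (PySem.Dict.mk ((PySem.Dict.mk gr).getD n [])) "members" []

-- A's _stable_unique
def stableUnique (values : List String) : List String :=
  let p := values.foldl
    (fun (acc : PySem.Set String × List String) value =>
      if PySem.Set.contains acc.1 value = true then acc
      else (PySem.Set.add acc.1 value, acc.2 ++ [value]))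
    (PySem.Set.empty, [])
  PySem.List.sorted p.2 (fun x => x) false

-- termination measure shared by both ports: number of not-yet-visited group keys
def pvMu (gr : List (String × List (String × List String))) (v : List String) : Nat :=
  ((gr.map Prod.fst).filter (fun k => !(List.contains v k))).length

-- termination helper: a pointwise-stronger filter that newly fails at a member is strictly shorter
lemma pv_filter_length_lt {α : Type} (l : List α) (p q : α → Bool)
    (himp : ∀ x, q x = true → p x = true) (a : α) (ha : a ∈ l)
    (hpa : p a = true) (hqa : q a = false) :
    (l.filter q).length < (l.filter p).length := by
  induction l with
  | nil => cases ha
  | cons x xs ih =>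
    rcases List.mem_cons.mp ha with rfl | hmem
    · have hsub := List.monotone_filter_right xs himp
      have := hsub.length_le
      simp [hpa, hqa]
      omega
    · have h1 := ih hmem
      by_cases hq : q x = true
      · have hp := himp x hq
        simp [hp, hq]
        omega
      · simp at hq
        by_cases hp : p x = true <;> simp [hp, hq] <;> omega

lemma pv_mem_seedSet (o : Option (List String)) (x : String) :
    x ∈ seedSet o ↔ x ∈ o.getD [] := by
  cases o <;> simp [seedSet, PySem.Set.mem_ofList, PySem.Set.empty]

-- termination: the measure strictly decreases when a fresh group node is marked visited …
lemma pv_mu_lt (service_groups : List (String × List (String × List String))) (visited : PySem.Set String) (n : String)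
    (h2 : ¬ PySem.Set.contains visited n = true)
    (h3 : PySem.Dict.contains (PySem.Dict.mk service_groups) n = true) :
    pvMu service_groups (PySem.Set.add visited n) < pvMu service_groups visited := by
  apply pv_filter_length_lt (a := n)
  · intro x hx
    simp only [Bool.not_eq_true', ← Bool.not_eq_true, List.contains_iff_mem] at hx ⊢
    intro hmem
    exact hx ((PySem.Set.mem_add _ _ _).mpr (Or.inl hmem))
  · have h3' := h3
    rw [PySem.Dict.contains_eq_decide_mem_keys] at h3'
    simpa [PySem.Dict.keys] using of_decide_eq_true h3'
  · simp only [Bool.not_eq_true', ← Bool.not_eq_true, List.contains_iff_mem]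
    intro hmem
    exact h2 ((PySem.Set.contains_iff _ _).mpr hmem)
  · simp [PySem.Set.mem_add]

-- … and is unchanged when a non-group leaf is marked visited
lemma pv_mu_eq (service_groups : List (String × List (String × List String))) (visited : PySem.Set String) (n : String)
    (h3 : ¬ PySem.Dict.contains (PySem.Dict.mk service_groups) n = true) :
    pvMu service_groups (PySem.Set.add visited n) = pvMu service_groups visited := by
  unfold pvMu
  congr 1
  apply List.filter_congr
  intro k hk
  have hne : k ≠ n := by
    intro he
    apply h3
    rw [PySem.Dict.contains_eq_decide_mem_keys]
    apply decide_eq_true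
    rw [← he]
    simpa [PySem.Dict.keys] using hk
  have hc : List.contains (PySem.Set.add visited n) k = List.contains visited k := by
    rw [Bool.eq_iff_iff]
    simp only [List.contains_iff_mem]
    exact ⟨fun h => ((PySem.Set.mem_add _ _ _).mp h).resolve_right hne,
           fun h => (PySem.Set.mem_add _ _ _).mpr (Or.inl h)⟩
  rw [hc]

def expand_service (name : String) (services : List (String × List (String × String))) (service_groups : List (String × List (String × List String))) (_seen : Option (List String)) : List String :=
  let normalized := normBroad name
  if normalized = "any" then ["any"]
  else
    let seen := seedSet _seen
    if h2 : PySem.Set.contains seen normalized = true then []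
    else
      let seen2 := PySem.Set.add seen normalized
      if h3 : PySem.Dict.contains (PySem.Dict.mk service_groups) normalized = true then
        stableUnique ((membersOf service_groups normalized).flatMap
          (fun member => expand_service member services service_groups (some seen2)))
      else if PySem.Dict.contains (PySem.Dict.mk services) normalized = true then
        let service := PySem.Dict.getD (PySem.Dict.mk services) normalized []
        let protocol := PySem.Dict.getD (PySem.Dict.mk service) "protocol" ""
        let port := PySem.Dict.getD (PySem.Dict.mk service) "port" ""
        if protocol ≠ "" ∧ port ≠ "" then [protocol ++ "/" ++ port] else [normalized]
      else [normalized]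
termination_by pvMu service_groups (_seen.getD [])
decreasing_by
  have h := pv_mu_lt service_groups (seedSet _seen) (normBroad name) h2 h3
  unfold pvMu at h ⊢
  refine Nat.lt_of_lt_of_le h (List.Sublist.length_le (List.monotone_filter_right _ ?_))
  intro x hx
  simp only [Bool.not_eq_true', ← Bool.not_eq_true, List.contains_iff_mem] at hx ⊢
  intro hmem
  exact hx ((pv_mem_seedSet _seen x).mpr hmem)

-- ===== PORT B =====

-- B's _canon
def canonB (value : String) : String :=
  let text := if value = "" then "" else PySem.Str.strip value
  if (["any", "all", "*"] : List String).contains (PySem.Str.lower text) = true then "any" else text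

-- B's _leaf
def leafB (services : List (String × List (String × String))) (n : String) : String :=
  if PySem.Dict.contains (PySem.Dict.mk services) n = true then
    let service := PySem.Dict.getD (PySem.Dict.mk services) n []
    let protocol := PySem.Dict.getD (PySem.Dict.mk service) "protocol" ""
    let port := PySem.Dict.getD (PySem.Dict.mk service) "port" ""
    if protocol ≠ "" ∧ port ≠ "" then protocol ++ "/" ++ port else n
  else n

-- the body of B's `for member in frontier:` loop; state = (level, visited, out)
def bfsStep (services : List (String × List (String × String))) (service_groups : List (String × List (String × List String)))
    (st : List String × PySem.Set String × PySem.Set String) (member : String) :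
    List String × PySem.Set String × PySem.Set String :=
  let n := canonB member
  if n = "any" then (st.1, st.2.1, PySem.Set.add st.2.2 "any")
  else if PySem.Set.contains st.2.1 n = true then st
  else if PySem.Dict.contains (PySem.Dict.mk service_groups) n = true then
    (st.1 ++ membersOf service_groups n, PySem.Set.add st.2.1 n, st.2.2)
  else (st.1, PySem.Set.add st.2.1 n, PySem.Set.add st.2.2 (leafB services n))

-- the four possible outcomes of one BFS body step
lemma bfsStep_cases (sv : List (String × List (String × String))) (gr : List (String × List (String × List String)))
    (st : List String × PySem.Set String × PySem.Set String) (member : String) :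
    (canonB member = "any" ∧ bfsStep sv gr st member = (st.1, st.2.1, PySem.Set.add st.2.2 "any"))
    ∨ (¬ canonB member = "any" ∧ PySem.Set.contains st.2.1 (canonB member) = true ∧ bfsStep sv gr st member = st)
    ∨ (¬ canonB member = "any" ∧ ¬ PySem.Set.contains st.2.1 (canonB member) = true
        ∧ PySem.Dict.contains (PySem.Dict.mk gr) (canonB member) = true
        ∧ bfsStep sv gr st member = (st.1 ++ membersOf gr (canonB member), PySem.Set.add st.2.1 (canonB member), st.2.2))
    ∨ (¬ canonB member = "any" ∧ ¬ PySem.Set.contains st.2.1 (canonB member) = true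
        ∧ ¬ PySem.Dict.contains (PySem.Dict.mk gr) (canonB member) = true
        ∧ bfsStep sv gr st member = (st.1, PySem.Set.add st.2.1 (canonB member), PySem.Set.add st.2.2 (leafB sv (canonB member)))) := by
  unfold bfsStep
  by_cases h1 : canonB member = "any"
  · exact Or.inl ⟨h1, by rw [if_pos h1]⟩
  · by_cases h2 : PySem.Set.contains st.2.1 (canonB member) = true
    · exact Or.inr (Or.inl ⟨h1, h2, by rw [if_neg h1, if_pos h2]⟩)
    · by_cases h3 : PySem.Dict.contains (PySem.Dict.mk gr) (canonB member) = true
      · exact Or.inr (Or.inr (Or.inl ⟨h1, h2, h3, by rw [if_neg h1, if_neg h2, if_pos h3]⟩))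
      · exact Or.inr (Or.inr (Or.inr ⟨h1, h2, h3, by rw [if_neg h1, if_neg h2, if_neg h3]⟩))

-- termination invariant of one BFS level: the measure never grows, and a non-empty next level
-- means some fresh group node was visited, so the measure strictly shrank
lemma pv_bfsFold_mu (services : List (String × List (String × String))) (service_groups : List (String × List (String × List String))) :
    ∀ (frontier : List String) (st : List String × PySem.Set String × PySem.Set String) (m0 : Nat),
      pvMu service_groups st.2.1 ≤ m0 → (st.1 ≠ [] → pvMu service_groups st.2.1 < m0) →
      pvMu service_groups (frontier.foldl (bfsStep services service_groups) st).2.1 ≤ m0 ∧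
        ((frontier.foldl (bfsStep services service_groups) st).1 ≠ [] →
          pvMu service_groups (frontier.foldl (bfsStep services service_groups) st).2.1 < m0) := by
  intro frontier
  induction frontier with
  | nil => intro st m0 h1 h2; exact ⟨h1, h2⟩
  | cons member rest ih =>
    intro st m0 h1 h2
    rw [List.foldl_cons]
    rcases bfsStep_cases services service_groups st member with ⟨_, h⟩ | ⟨_, _, h⟩ | ⟨_, hv, hg, h⟩ | ⟨_, _, hg, h⟩
    · rw [h]; exact ih _ m0 h1 h2
    · rw [h]; exact ih _ m0 h1 h2
    · rw [h]
      have hlt : pvMu service_groups (PySem.Set.add st.2.1 (canonB member)) < m0 :=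
        Nat.lt_of_lt_of_le (pv_mu_lt _ _ _ hv hg) h1
      exact ih _ m0 (Nat.le_of_lt hlt) (fun _ => hlt)
    · rw [h]
      have he := pv_mu_eq service_groups st.2.1 (canonB member) hg
      exact ih _ m0 (by rw [he]; exact h1) (fun hne => by rw [he]; exact h2 hne)

-- B's `while frontier:` loop, one level per step
def bfsLoop (services : List (String × List (String × String))) (service_groups : List (String × List (String × List String)))
    (frontier : List String) (visited : PySem.Set String) (out : PySem.Set String) : PySem.Set String :=
  match frontier with
  | [] => out
  | member :: rest =>
    let st := (member :: rest).foldl (bfsStep services service_groups) ([], visited, out)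
    bfsLoop services service_groups st.1 st.2.1 st.2.2
termination_by (pvMu service_groups visited, frontier.length)
decreasing_by
  have h := pv_bfsFold_mu services service_groups (member :: rest) ([], visited, out)
      (pvMu service_groups visited) (Nat.le_refl _) (fun hc => absurd rfl hc)
  rcases Nat.lt_or_ge (pvMu service_groups ((member :: rest).foldl (bfsStep services service_groups) ([], visited, out)).2.1)
      (pvMu service_groups visited) with hlt | hge
  · exact Prod.Lex.left _ _ hlt
  · have heq : pvMu service_groups ((member :: rest).foldl (bfsStep services service_groups) ([], visited, out)).2.1
        = pvMu service_groups visited := Nat.le_antisymm h.1 hge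
    have hnil : ((member :: rest).foldl (bfsStep services service_groups) ([], visited, out)).1 = [] := by
      by_contra hne
      exact absurd heq (Nat.ne_of_lt (h.2 hne))
    rw [heq, hnil]
    exact Prod.Lex.right _ (Nat.succ_pos _)

def expand_service_alt (name : String) (services : List (String × List (String × String))) (service_groups : List (String × List (String × List String))) (_seen : Option (List String)) : List String :=
  let normalized := canonB name
  if normalized = "any" then ["any"]
  else
    let visited := PySem.Set.ofList (_seen.getD [])
    if PySem.Set.contains visited normalized = true then []
    else
      let visited2 := PySem.Set.add visited normalized
      if ¬ PySem.Dict.contains (PySem.Dict.mk service_groups) normalized = true then [leafB services normalized]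
      else
        PySem.List.sorted
          (bfsLoop services service_groups (membersOf service_groups normalized) visited2 PySem.Set.empty)
          (fun x => x) false

-- ===== PRECONDITION & SPEC =====
def Spec_expand_service (name : String) (services : List (String × List (String × String))) (service_groups : List (String × List (String × List String))) (_seen : Option (List String)) (out : List String) : Prop := out = expand_service_alt name services service_groups _seen
instance (name : String) (services : List (String × List (String × String))) (service_groups : List (String × List (String × List String))) (_seen : Option (List String)) (out : List String) : Decidable (Spec_expand_service name services service_groups _seen out) := by unfold Spec_expand_service; infer_instance

-- ===== CLAIM (what is proved, stated in full; the proofs are below) =====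
def Claim_equal_expand_service : Prop := ∀ (name : String) (services : List (String × List (String × String))) (service_groups : List (String × List (String × List String))) (_seen : Option (List String)), Dom_expand_service name services service_groups _seen → Spec_expand_service name services service_groups _seen (expand_service name services service_groups _seen)

-- ===== LEMMAS AND PROOFS =====

lemma canonB_eq (v : String) : canonB v = normBroad v := by
  unfold canonB normBroad
  have hs : (if v = "" then "" else PySem.Str.strip v) = PySem.Str.strip v := by
    by_cases h : v = ""
    · rw [if_pos h, h]; rfl
    · rw [if_neg h]
  rw [hs]
  by_cases h : PySem.Str.lower (PySem.Str.strip v) = "any" ∨ PySem.Str.lower (PySem.Str.strip v) = "all" ∨ PySem.Str.lower (PySem.Str.strip v) = "*"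
  · rw [if_pos h, if_pos]
    simp only [List.contains_iff_mem, List.mem_cons, List.not_mem_nil, or_false]
    exact h
  · rw [if_neg h, if_neg]
    simp only [List.contains_iff_mem, List.mem_cons, List.not_mem_nil, or_false]
    exact h

lemma ofList_getD_eq_seedSet (o : Option (List String)) :
    PySem.Set.ofList (o.getD []) = seedSet o := by
  cases o <;> rfl

-- Fueled "globally collectible" relation: from node `a` (already normalized), avoiding the
-- fixed set `s`, value `v` is one of the leaf values reachable through the group graph.
inductive NCk (sv : List (String × List (String × String))) (gr : List (String × List (String × List String))) : Nat → List String → String → String → Prop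
  | any (k : Nat) (s : List String) : NCk sv gr k s "any" "any"
  | leaf (k : Nat) (s : List String) (a : String) :
      a ≠ "any" → a ∉ s → PySem.Dict.contains (PySem.Dict.mk gr) a = false →
      NCk sv gr k s a (leafB sv a)
  | grp (k : Nat) (s : List String) (a m v : String) :
      a ≠ "any" → a ∉ s → PySem.Dict.contains (PySem.Dict.mk gr) a = true →
      m ∈ membersOf gr a → NCk sv gr k s (normBroad m) v → NCk sv gr (k + 1) s a v

-- Path-local collectible relation: mirrors A's recursion (the avoid set grows along the path).
inductive PC (sv : List (String × List (String × String))) (gr : List (String × List (String × List String))) : List String → String → String → Prop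
  | any (s : List String) : PC sv gr s "any" "any"
  | leaf (s : List String) (a : String) :
      a ≠ "any" → a ∉ s → PySem.Dict.contains (PySem.Dict.mk gr) a = false →
      PC sv gr s a (leafB sv a)
  | grp (s : List String) (a m v : String) :
      a ≠ "any" → a ∉ s → PySem.Dict.contains (PySem.Dict.mk gr) a = true →
      m ∈ membersOf gr a → PC sv gr (a :: s) (normBroad m) v → PC sv gr s a v

lemma NCk_succ {sv gr k s a v} (h : NCk sv gr k s a v) : NCk sv gr (k + 1) s a v := by
  induction h with
  | any k s => exact .any _ _
  | leaf k s a h1 h2 h3 => exact .leaf _ _ _ h1 h2 h3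
  | grp k s a m v h1 h2 h3 h4 _ ih => exact .grp _ _ _ _ _ h1 h2 h3 h4 ih

lemma NCk_subset {sv gr k s t a v} (h : NCk sv gr k t a v) (hst : ∀ x, x ∈ s → x ∈ t) :
    NCk sv gr k s a v := by
  induction h generalizing s with
  | any k t => exact .any _ _
  | leaf k t a h1 h2 h3 => exact .leaf _ _ _ h1 (fun hm => h2 (hst _ hm)) h3
  | grp k t a m v h1 h2 h3 h4 _ ih =>
    exact .grp _ _ _ _ _ h1 (fun hm => h2 (hst _ hm)) h3 h4 (ih hst)

lemma NCk_cut {sv gr k s a v} (h : NCk sv gr k s a v) (b : String) :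
    NCk sv gr k (b :: s) a v ∨ NCk sv gr k s b v := by
  induction h with
  | any k s => exact Or.inl (.any _ _)
  | leaf k s a h1 h2 h3 =>
    by_cases hab : a = b
    · exact Or.inr (hab ▸ .leaf _ _ _ h1 h2 h3)
    · exact Or.inl (.leaf _ _ _ h1 (by simp [List.mem_cons, h2, hab]) h3)
  | grp k s a m v h1 h2 h3 h4 hsub ih =>
    rcases ih with h' | h'
    · by_cases hab : a = b
      · exact Or.inr (hab ▸ .grp _ _ _ _ _ h1 h2 h3 h4 hsub)
      · exact Or.inl (.grp _ _ _ _ _ h1 (by simp [List.mem_cons, h2, hab]) h3 h4 h')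
    · exact Or.inr (NCk_succ h')

lemma NCk_any_val {sv gr k s v} (h : NCk sv gr k s "any" v) : v = "any" := by
  cases h with
  | any => rfl
  | leaf _ _ _ h1 => exact absurd rfl h1
  | grp _ _ _ _ _ h1 => exact absurd rfl h1

lemma NCk_mem_false {sv gr k s a v} (h : NCk sv gr k s a v) (hne : a ≠ "any") (hmem : a ∈ s) :
    False := by
  cases h with
  | any => exact hne rfl
  | leaf _ _ _ _ h2 => exact h2 hmem
  | grp _ _ _ _ _ _ h2 => exact h2 hmem

lemma NCk_leaf_val {sv gr k s a v} (h : NCk sv gr k s a v) (hne : a ≠ "any")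
    (hg : PySem.Dict.contains (PySem.Dict.mk gr) a = false) : v = leafB sv a := by
  cases h with
  | any => exact absurd rfl hne
  | leaf => rfl
  | grp _ _ _ _ _ _ _ h3 => rw [h3] at hg; cases hg

lemma NCk_expand {sv gr} : ∀ k {s a v}, NCk sv gr k s a v → a ≠ "any" →
    PySem.Dict.contains (PySem.Dict.mk gr) a = true →
    ∃ m ∈ membersOf gr a, ∃ j, NCk sv gr j (a :: s) (normBroad m) v := by
  intro k
  induction k using Nat.strong_induction_on with
  | _ k ih =>
    intro s a v h hne hct
    cases h with
    | any => exact absurd rfl hne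
    | leaf _ _ _ _ _ h3 => rw [hct] at h3; cases h3
    | grp k0 s a m v h1 h2 h3 h4 hsub =>
      rcases NCk_cut hsub a with h' | h'
      · exact ⟨m, h4, k0, h'⟩
      · exact ih k0 (Nat.lt_succ_self _) h' hne hct

lemma PC_to_NCk {sv gr s a v} (h : PC sv gr s a v) : ∃ k, NCk sv gr k s a v := by
  induction h with
  | any s => exact ⟨0, .any _ _⟩
  | leaf s a h1 h2 h3 => exact ⟨0, .leaf _ _ _ h1 h2 h3⟩
  | grp s a m v h1 h2 h3 h4 _ ih =>
    rcases ih with ⟨k, hk⟩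
    exact ⟨k + 1, .grp _ _ _ _ _ h1 h2 h3 h4 (NCk_subset hk (fun x hx => List.mem_cons_of_mem _ hx))⟩

lemma NCk_to_PC {sv gr} : ∀ k {s a v}, NCk sv gr k s a v → PC sv gr s a v := by
  intro k
  induction k using Nat.strong_induction_on with
  | _ k ih =>
    intro s a v h
    cases h with
    | any => exact .any _
    | leaf _ _ _ h1 h2 h3 => exact .leaf _ _ h1 h2 h3
    | grp k0 s a m v h1 h2 h3 h4 hsub =>
      rcases NCk_cut hsub a with h' | h'
      · exact .grp _ _ _ _ h1 h2 h3 h4 (ih k0 (Nat.lt_succ_self _) h')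
      · exact ih k0 (Nat.lt_succ_self _) h'

lemma PC_congr {sv gr s t a v} (hst : ∀ x, x ∈ s ↔ x ∈ t) (h : PC sv gr s a v) :
    PC sv gr t a v := by
  induction h generalizing t with
  | any s => exact .any _
  | leaf s a h1 h2 h3 => exact .leaf _ _ h1 (fun hm => h2 ((hst _).mpr hm)) h3
  | grp s a m v h1 h2 h3 h4 _ ih =>
    exact .grp _ _ _ _ h1 (fun hm => h2 ((hst _).mpr hm)) h3 h4
      (ih (by intro x; simp [List.mem_cons, hst x]))

lemma PC_any_val {sv gr s v} (h : PC sv gr s "any" v) : v = "any" := by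
  cases h with
  | any => rfl
  | leaf _ _ h1 => exact absurd rfl h1
  | grp _ _ _ _ h1 => exact absurd rfl h1

lemma PC_mem_false {sv gr s a v} (h : PC sv gr s a v) (hne : a ≠ "any") (hmem : a ∈ s) : False := by
  cases h with
  | any => exact hne rfl
  | leaf _ _ _ h2 => exact h2 hmem
  | grp _ _ _ _ _ h2 => exact h2 hmem

lemma PC_leaf_val {sv gr s a v} (h : PC sv gr s a v) (hne : a ≠ "any")
    (hg : PySem.Dict.contains (PySem.Dict.mk gr) a = false) : v = leafB sv a := by
  cases h with
  | any => exact absurd rfl hne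
  | leaf => rfl
  | grp _ _ _ _ _ _ h3 => rw [h3] at hg; cases hg

lemma PC_grp_inv {sv gr s a v} (h : PC sv gr s a v) (hne : a ≠ "any")
    (hg : PySem.Dict.contains (PySem.Dict.mk gr) a = true) :
    ∃ m ∈ membersOf gr a, PC sv gr (a :: s) (normBroad m) v := by
  cases h with
  | any => exact absurd rfl hne
  | leaf _ _ _ _ h3 => rw [hg] at h3; cases h3
  | grp _ _ m _ _ _ _ h4 h5 => exact ⟨m, h4, h5⟩

lemma stableUnique_aux (l : List String) : ∀ (s : PySem.Set String),
    l.foldl (fun (acc : PySem.Set String × List String) value =>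
        if PySem.Set.contains acc.1 value = true then acc
        else (PySem.Set.add acc.1 value, acc.2 ++ [value])) (s, s)
      = (PySem.Set.update s l, PySem.Set.update s l) := by
  induction l with
  | nil => intro s; simp [PySem.Set.update_nil]
  | cons x xs ih =>
    intro s
    rw [List.foldl_cons, PySem.Set.update_cons]
    have hstep : (if PySem.Set.contains s x = true then (s, (s : List String))
        else (PySem.Set.add s x, (s : List String) ++ [x])) = (PySem.Set.add s x, PySem.Set.add s x) := by
      by_cases hmem : x ∈ s <;> simp [PySem.Set.add, PySem.Set.contains, hmem]
    exact hstep ▸ ih (PySem.Set.add s x)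

lemma stableUnique_eq (l : List String) :
    stableUnique l = PySem.List.sorted (PySem.Set.ofList l) (fun x => x) false := by
  unfold stableUnique
  rw [show ((PySem.Set.empty : PySem.Set String), ([] : List String))
        = ((PySem.Set.empty : PySem.Set String), (PySem.Set.empty : List String)) from rfl]
  rw [stableUnique_aux l PySem.Set.empty]
  rw [PySem.Set.update_empty]

lemma mem_stableUnique (l : List String) (v : String) : v ∈ stableUnique l ↔ v ∈ l := by
  rw [stableUnique_eq]
  rw [(PySem.List.sorted_perm (PySem.Set.ofList l) (fun x => x) false).mem_iff]
  exact PySem.Set.mem_ofList l v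

-- A's leaf branches compute exactly leafB
lemma expandA_leaf_eq (sv : List (String × List (String × String))) (n : String) (v : String) :
    v ∈ (if PySem.Dict.contains (PySem.Dict.mk sv) n = true then
        (if (PySem.Dict.getD (PySem.Dict.mk (PySem.Dict.getD (PySem.Dict.mk sv) n [])) "protocol" "") ≠ ""
              ∧ (PySem.Dict.getD (PySem.Dict.mk (PySem.Dict.getD (PySem.Dict.mk sv) n [])) "port" "") ≠ ""
          then [(PySem.Dict.getD (PySem.Dict.mk (PySem.Dict.getD (PySem.Dict.mk sv) n [])) "protocol" "")
                ++ "/" ++ (PySem.Dict.getD (PySem.Dict.mk (PySem.Dict.getD (PySem.Dict.mk sv) n [])) "port" "")]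
          else [n])
      else [n]) ↔ v = leafB sv n := by
  rw [leafB]
  by_cases hsv : PySem.Dict.contains (PySem.Dict.mk sv) n = true
  · simp only [if_pos hsv]
    by_cases hpp : (PySem.Dict.getD (PySem.Dict.mk (PySem.Dict.getD (PySem.Dict.mk sv) n [])) "protocol" "") ≠ ""
        ∧ (PySem.Dict.getD (PySem.Dict.mk (PySem.Dict.getD (PySem.Dict.mk sv) n [])) "port" "") ≠ ""
    · simp only [if_pos hpp, List.mem_singleton]
    · simp only [if_neg hpp, List.mem_singleton]
  · simp only [if_neg hsv, List.mem_singleton]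

-- the three non-recursive leaf branches of A, characterized in one step
lemma mem_expandA_leaf (sv : List (String × List (String × String))) (gr : List (String × List (String × List String)))
    (name : String) (o : Option (List String))
    (hn : ¬ normBroad name = "any")
    (hc : ¬ PySem.Set.contains (seedSet o) (normBroad name) = true)
    (hg : ¬ PySem.Dict.contains (PySem.Dict.mk gr) (normBroad name) = true) :
    ∀ v, v ∈ expand_service name sv gr o ↔ PC sv gr (o.getD []) (normBroad name) v := by
  intro v
  rw [expand_service.eq_def]
  simp only [if_neg hn, dif_neg hc, dif_neg hg]
  have hnm : normBroad name ∉ o.getD [] := fun hmem =>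
    hc ((PySem.Set.contains_iff _ _).mpr ((pv_mem_seedSet o _).mpr hmem))
  have hgf : PySem.Dict.contains (PySem.Dict.mk gr) (normBroad name) = false := Bool.eq_false_iff.mpr hg
  rw [expandA_leaf_eq sv (normBroad name) v]
  constructor
  · intro h
    rw [h]
    exact .leaf _ _ hn hnm hgf
  · exact fun h => PC_leaf_val h hn hgf

-- A's recursion collects exactly the path-collectible values
lemma mem_expandA (sv : List (String × List (String × String))) (gr : List (String × List (String × List String))) :
    ∀ (name : String) (o : Option (List String)) (v : String),
      v ∈ expand_service name sv gr o ↔ PC sv gr (o.getD []) (normBroad name) v := by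
  intro name o
  induction name, o using expand_service.induct sv gr with
  | case1 name o nrm h1 =>
    have hn : normBroad name = "any" := h1
    intro v
    rw [expand_service.eq_def]
    simp only [if_pos hn, List.mem_singleton]
    rw [hn]
    exact ⟨fun h => by subst h; exact .any _, fun h => PC_any_val h⟩
  | case2 name o nrm h1 sn h2 =>
    have hn : ¬ normBroad name = "any" := h1
    have hc : PySem.Set.contains (seedSet o) (normBroad name) = true := h2
    intro v
    rw [expand_service.eq_def]
    simp only [if_neg hn, dif_pos hc, List.not_mem_nil, false_iff]
    intro h
    exact PC_mem_false h hn ((pv_mem_seedSet o _).mp ((PySem.Set.contains_iff _ _).mp hc))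
  | case3 name o nrm h1 sn h2 sn2 h3 ih =>
    have hn : ¬ normBroad name = "any" := h1
    have hc : ¬ PySem.Set.contains (seedSet o) (normBroad name) = true := h2
    have hg : PySem.Dict.contains (PySem.Dict.mk gr) (normBroad name) = true := h3
    intro v
    rw [expand_service.eq_def]
    simp only [if_neg hn, dif_neg hc, dif_pos hg]
    rw [mem_stableUnique, List.mem_flatMap]
    have hseen : ∀ x, x ∈ (PySem.Set.add (seedSet o) (normBroad name) : List String)
        ↔ x ∈ normBroad name :: o.getD [] := by
      intro x
      rw [PySem.Set.mem_add, List.mem_cons, pv_mem_seedSet]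
      exact or_comm
    constructor
    · rintro ⟨m, hm, hv⟩
      have hpc := (ih m v).mp hv
      simp only [Option.getD_some] at hpc
      exact .grp _ _ _ _ hn
        (fun hmem => hc ((PySem.Set.contains_iff _ _).mpr ((pv_mem_seedSet o _).mpr hmem)))
        hg hm (PC_congr hseen hpc)
    · intro h
      rcases PC_grp_inv h hn hg with ⟨m, hm, hpc⟩
      refine ⟨m, hm, (ih m v).mpr ?_⟩
      simp only [Option.getD_some]
      exact PC_congr (fun x => (hseen x).symm) hpc
  | case4 name o nrm h1 sn h2 h3 h4 svc prot port h5 =>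
    exact mem_expandA_leaf sv gr name o h1 h2 h3
  | case5 name o nrm h1 sn h2 h3 h4 svc prot port h5 =>
    exact mem_expandA_leaf sv gr name o h1 h2 h3
  | case6 name o nrm h1 sn h2 h3 h4 =>
    exact mem_expandA_leaf sv gr name o h1 h2 h3

-- splitting an exists-over-append (used to flatten the frontier memberships)
lemma pv_exists_mem_append (l1 l2 : List String) (p : String → Prop) :
    (∃ x ∈ l1 ++ l2, p x) ↔ (∃ x ∈ l1, p x) ∨ (∃ x ∈ l2, p x) := by
  constructor
  · rintro ⟨m, hm, hp⟩
    rcases List.mem_append.mp hm with h | h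
    · exact Or.inl ⟨m, h, hp⟩
    · exact Or.inr ⟨m, h, hp⟩
  · rintro (⟨m, hm, hp⟩ | ⟨m, hm, hp⟩)
    · exact ⟨m, List.mem_append.mpr (Or.inl hm), hp⟩
    · exact ⟨m, List.mem_append.mpr (Or.inr hm), hp⟩

-- one BFS body step preserves the potential set (pending R, accumulated level st.1)
set_option maxHeartbeats 1000000 in
lemma pot_bfsStep (sv : List (String × List (String × String))) (gr : List (String × List (String × List String)))
    (st : List String × PySem.Set String × PySem.Set String) (member : String) (R : List String) (v : String) :
    (v ∈ (bfsStep sv gr st member).2.2 ∨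
      ∃ m ∈ R ++ (bfsStep sv gr st member).1, ∃ k, NCk sv gr k (bfsStep sv gr st member).2.1 (normBroad m) v)
    ↔ (v ∈ st.2.2 ∨ ∃ m ∈ member :: (R ++ st.1), ∃ k, NCk sv gr k st.2.1 (normBroad m) v) := by
  rcases bfsStep_cases sv gr st member with ⟨hn, h⟩ | ⟨hn, hv2, h⟩ | ⟨hn, hv2, hg, h⟩ | ⟨hn, hv2, hg, h⟩
  · -- any
    rw [canonB_eq] at hn
    rw [h]
    have hEm : (∃ k, NCk sv gr k st.2.1 (normBroad member) v) ↔ v = "any" := by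
      rw [hn]
      exact ⟨fun ⟨_, h⟩ => NCk_any_val h, fun h => ⟨0, by subst h; exact .any _ _⟩⟩
    rw [PySem.Set.mem_add, List.exists_mem_cons_iff, hEm]
    exact or_assoc
  · -- already visited
    rw [canonB_eq] at hn hv2
    rw [h]
    have hEm : ¬ ∃ k, NCk sv gr k st.2.1 (normBroad member) v := by
      rintro ⟨_, h⟩
      exact NCk_mem_false h hn ((PySem.Set.contains_iff _ _).mp hv2)
    rw [List.exists_mem_cons_iff]
    constructor
    · rintro (h' | h')
      · exact Or.inl h'
      · exact Or.inr (Or.inr h')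
    · rintro (h' | (hP | h'))
      · exact Or.inl h'
      · exact absurd hP hEm
      · exact Or.inr h'
  · -- fresh group node
    rw [canonB_eq] at hn hv2 hg h
    rw [h]
    have hnvis : normBroad member ∉ st.2.1 :=
      fun hmem => hv2 ((PySem.Set.contains_iff _ _).mpr hmem)
    have hsub1 : ∀ x, x ∈ (PySem.Set.add st.2.1 (normBroad member) : List String)
        → x ∈ normBroad member :: st.2.1 := by
      intro x hx
      rcases (PySem.Set.mem_add _ _ _).mp hx with h' | h'
      · exact List.mem_cons_of_mem _ h'
      · exact h' ▸ List.mem_cons_self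
    have hvis : ∀ x, x ∈ st.2.1 → x ∈ (PySem.Set.add st.2.1 (normBroad member) : List String) :=
      fun x hx => (PySem.Set.mem_add _ _ _).mpr (Or.inl hx)
    have hPnPo : ∀ (L : List String),
        (∃ m ∈ L, ∃ k, NCk sv gr k (PySem.Set.add st.2.1 (normBroad member)) (normBroad m) v)
        → (∃ m ∈ L, ∃ k, NCk sv gr k st.2.1 (normBroad m) v) := by
      rintro L ⟨m, hm, k, hk⟩
      exact ⟨m, hm, k, NCk_subset hk hvis⟩
    have hPoPn : ∀ (L : List String),
        (∃ m ∈ L, ∃ k, NCk sv gr k st.2.1 (normBroad m) v)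
        → (∃ m ∈ L, ∃ k, NCk sv gr k (PySem.Set.add st.2.1 (normBroad member)) (normBroad m) v)
          ∨ (∃ k, NCk sv gr k st.2.1 (normBroad member) v) := by
      rintro L ⟨m, hm, k, hk⟩
      rcases NCk_cut hk (normBroad member) with h' | h'
      · exact Or.inl ⟨m, hm, k, NCk_subset h' hsub1⟩
      · exact Or.inr ⟨k, h'⟩
    have hexp : (∃ k, NCk sv gr k st.2.1 (normBroad member) v)
        ↔ ∃ m' ∈ membersOf gr (normBroad member), ∃ k,
            NCk sv gr k (PySem.Set.add st.2.1 (normBroad member)) (normBroad m') v := by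
      constructor
      · rintro ⟨k, hk⟩
        rcases NCk_expand k hk hn hg with ⟨m', hm', j, hj⟩
        exact ⟨m', hm', j, NCk_subset hj hsub1⟩
      · rintro ⟨m', hm', k, hk⟩
        exact ⟨k + 1, .grp _ _ _ _ _ hn hnvis hg hm' (NCk_subset hk hvis)⟩
    rw [List.exists_mem_cons_iff, ← List.append_assoc, pv_exists_mem_append (R ++ st.1),
      pv_exists_mem_append R st.1, pv_exists_mem_append R st.1, hexp]
    constructor
    · rintro (ho | ((hA | hB) | hM))
      · exact Or.inl ho
      · exact Or.inr (Or.inr (Or.inl (hPnPo R hA)))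
      · exact Or.inr (Or.inr (Or.inr (hPnPo st.1 hB)))
      · exact Or.inr (Or.inl hM)
    · rintro (ho | (hP | (hA | hB)))
      · exact Or.inl ho
      · exact Or.inr (Or.inr hP)
      · rcases hPoPn R hA with h' | h'
        · exact Or.inr (Or.inl (Or.inl h'))
        · exact Or.inr (Or.inr (hexp.mp h'))
      · rcases hPoPn st.1 hB with h' | h'
        · exact Or.inr (Or.inl (Or.inr h'))
        · exact Or.inr (Or.inr (hexp.mp h'))
  · -- fresh leaf node
    rw [canonB_eq] at hn hv2 hg h
    rw [h]
    have hnvis : normBroad member ∉ st.2.1 :=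
      fun hmem => hv2 ((PySem.Set.contains_iff _ _).mpr hmem)
    have hsub1 : ∀ x, x ∈ (PySem.Set.add st.2.1 (normBroad member) : List String)
        → x ∈ normBroad member :: st.2.1 := by
      intro x hx
      rcases (PySem.Set.mem_add _ _ _).mp hx with h' | h'
      · exact List.mem_cons_of_mem _ h'
      · exact h' ▸ List.mem_cons_self
    have hvis : ∀ x, x ∈ st.2.1 → x ∈ (PySem.Set.add st.2.1 (normBroad member) : List String) :=
      fun x hx => (PySem.Set.mem_add _ _ _).mpr (Or.inl hx)
    have hPnPo : ∀ (L : List String),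
        (∃ m ∈ L, ∃ k, NCk sv gr k (PySem.Set.add st.2.1 (normBroad member)) (normBroad m) v)
        → (∃ m ∈ L, ∃ k, NCk sv gr k st.2.1 (normBroad m) v) := by
      rintro L ⟨m, hm, k, hk⟩
      exact ⟨m, hm, k, NCk_subset hk hvis⟩
    have hPoPn : ∀ (L : List String),
        (∃ m ∈ L, ∃ k, NCk sv gr k st.2.1 (normBroad m) v)
        → (∃ m ∈ L, ∃ k, NCk sv gr k (PySem.Set.add st.2.1 (normBroad member)) (normBroad m) v)
          ∨ (∃ k, NCk sv gr k st.2.1 (normBroad member) v) := by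
      rintro L ⟨m, hm, k, hk⟩
      rcases NCk_cut hk (normBroad member) with h' | h'
      · exact Or.inl ⟨m, hm, k, NCk_subset h' hsub1⟩
      · exact Or.inr ⟨k, h'⟩
    have hgf : PySem.Dict.contains (PySem.Dict.mk gr) (normBroad member) = false := Bool.eq_false_iff.mpr hg
    have hEm : (∃ k, NCk sv gr k st.2.1 (normBroad member) v)
        ↔ v = leafB sv (normBroad member) :=
      ⟨fun ⟨_, h'⟩ => NCk_leaf_val h' hn hgf, fun h' => ⟨0, by subst h'; exact .leaf _ _ _ hn hnvis hgf⟩⟩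
    rw [PySem.Set.mem_add, List.exists_mem_cons_iff, hEm,
      pv_exists_mem_append R st.1, pv_exists_mem_append R st.1]
    constructor
    · rintro ((ho | hlf) | (hA | hB))
      · exact Or.inl ho
      · exact Or.inr (Or.inl hlf)
      · exact Or.inr (Or.inr (Or.inl (hPnPo R hA)))
      · exact Or.inr (Or.inr (Or.inr (hPnPo st.1 hB)))
    · rintro (ho | (hlf | (hA | hB)))
      · exact Or.inl (Or.inl ho)
      · exact Or.inl (Or.inr hlf)
      · rcases hPoPn R hA with h' | h'
        · exact Or.inr (Or.inl h')
        · exact Or.inl (Or.inr (hEm.mp h'))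
      · rcases hPoPn st.1 hB with h' | h'
        · exact Or.inr (Or.inr h')
        · exact Or.inl (Or.inr (hEm.mp h'))

-- a whole BFS level preserves the potential set
lemma pot_bfsLevel (sv : List (String × List (String × String))) (gr : List (String × List (String × List String))) :
    ∀ (frontier : List String) (st : List String × PySem.Set String × PySem.Set String) (v : String),
      (v ∈ (frontier.foldl (bfsStep sv gr) st).2.2 ∨
        ∃ m ∈ (frontier.foldl (bfsStep sv gr) st).1, ∃ k,
          NCk sv gr k (frontier.foldl (bfsStep sv gr) st).2.1 (normBroad m) v)
      ↔ (v ∈ st.2.2 ∨ ∃ m ∈ frontier ++ st.1, ∃ k, NCk sv gr k st.2.1 (normBroad m) v) := by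
  intro frontier
  induction frontier with
  | nil => intro st v; simp
  | cons member rest ih =>
    intro st v
    rw [List.foldl_cons, List.cons_append]
    exact Iff.trans (ih _ v) (pot_bfsStep sv gr st member rest v)

-- B's loop collects exactly the globally collectible values of the frontier
lemma mem_bfsLoop (sv : List (String × List (String × String))) (gr : List (String × List (String × List String))) :
    ∀ (frontier : List String) (visited out : PySem.Set String) (v : String),
      v ∈ bfsLoop sv gr frontier visited out ↔
        v ∈ out ∨ ∃ m ∈ frontier, ∃ k, NCk sv gr k visited (normBroad m) v := by
  intro frontier visited out
  induction frontier, visited, out using bfsLoop.induct sv gr with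
  | case1 visited out =>
    intro v
    rw [bfsLoop]
    simp
  | case2 visited out member rest st ih =>
    intro v
    rw [bfsLoop]
    refine Iff.trans (ih v) ?_
    refine Iff.trans (pot_bfsLevel sv gr (member :: rest) ([], visited, out) v) ?_
    rw [List.append_nil]

lemma nodup_bfsStep_fold (sv : List (String × List (String × String))) (gr : List (String × List (String × List String))) :
    ∀ (frontier : List String) (st : List String × PySem.Set String × PySem.Set String),
      st.2.2.Nodup → ((frontier.foldl (bfsStep sv gr) st).2.2).Nodup := by
  intro frontier
  induction frontier with
  | nil => intro st h; exact h
  | cons member rest ih =>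
    intro st h
    rw [List.foldl_cons]
    rcases bfsStep_cases sv gr st member with ⟨_, he⟩ | ⟨_, _, he⟩ | ⟨_, _, _, he⟩ | ⟨_, _, _, he⟩ <;> rw [he]
    · exact ih _ (PySem.Set.nodup_add _ _ h)
    · exact ih _ h
    · exact ih _ h
    · exact ih _ (PySem.Set.nodup_add _ _ h)

lemma nodup_bfsLoop (sv : List (String × List (String × String))) (gr : List (String × List (String × List String))) :
    ∀ (frontier : List String) (visited out : PySem.Set String), out.Nodup →
      (bfsLoop sv gr frontier visited out).Nodup := by
  intro frontier visited out
  induction frontier, visited, out using bfsLoop.induct sv gr with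
  | case1 visited out => intro h; rw [bfsLoop]; exact h
  | case2 visited out member rest st ih =>
    intro h
    rw [bfsLoop]
    exact ih (nodup_bfsStep_fold sv gr (member :: rest) ([], visited, out) h)

-- ===== VERDICT (by name: the statement is the Claim_ definition above) =====
theorem expand_service_spec : Claim_equal_expand_service := by
  intro name sv gr o _
  unfold Spec_expand_service
  rw [expand_service.eq_def, expand_service_alt]
  simp only [canonB_eq, ofList_getD_eq_seedSet]
  by_cases h1 : normBroad name = "any"
  · simp only [if_pos h1]
  · simp only [if_neg h1]
    by_cases hc : PySem.Set.contains (seedSet o) (normBroad name) = true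
    · simp only [dif_pos hc, if_pos hc]
    · simp only [dif_neg hc, if_neg hc]
      by_cases hg : PySem.Dict.contains (PySem.Dict.mk gr) (normBroad name) = true
      · simp only [dif_pos hg, if_neg (not_not_intro hg)]
        rw [stableUnique_eq]
        rw [PySem.List.sorted_id_eq_sorted_id_iff_perm]
        have hnodupB : (bfsLoop sv gr (membersOf gr (normBroad name))
            (PySem.Set.add (seedSet o) (normBroad name)) PySem.Set.empty).Nodup :=
          nodup_bfsLoop sv gr _ _ _ List.nodup_nil
        rw [List.perm_ext_iff_of_nodup (PySem.Set.nodup_ofList _) hnodupB]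
        intro a
        rw [PySem.Set.mem_ofList, List.mem_flatMap, mem_bfsLoop]
        simp only [PySem.Set.empty, List.not_mem_nil, false_or]
        constructor
        · rintro ⟨m, hm, hv⟩
          have hpc := (mem_expandA sv gr m (some (PySem.Set.add (seedSet o) (normBroad name))) a).mp hv
          simp only [Option.getD_some] at hpc
          rcases PC_to_NCk hpc with ⟨k, hk⟩
          exact ⟨m, hm, k, hk⟩
        · rintro ⟨m, hm, k, hk⟩
          refine ⟨m, hm, ?_⟩
          refine (mem_expandA sv gr m (some (PySem.Set.add (seedSet o) (normBroad name))) a).mpr ?_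
          simp only [Option.getD_some]
          exact NCk_to_PC k hk
      · simp only [dif_neg hg, if_pos hg]
        rw [leafB]
        by_cases hsv : PySem.Dict.contains (PySem.Dict.mk sv) (normBroad name) = true
        · simp only [if_pos hsv]
          split_ifs <;> rfl
        · simp only [if_neg hsv]
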